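-- pv_equiv track=rewrite | github.com/tinabertok/programiranje-1 | 13-memoizacija/vaje/dodatne_vaje.py | najdaljse_narascajoce_podzaporedje
-- ===== SOURCE A (Python) =====
-- def najdaljse_narascajoce_podzaporedje(sez):
-- 		zaporedje = []
-- 		for i in range(len(sez)):
-- 				if sez[i] == min(sez[i :]):
-- 						zaporedje.append(sez[i])
-- 				else:
-- 						pass
-- 		return zaporedje
-- ===== SOURCE B (Python) =====
-- def najdaljse_narascajoce_podzaporedje(sez):
--     # One backward pass keeping the running minimum of the suffix seen so far:
--     # an element belongs to the result iff it is <= every element to its right.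
--     out = []
--     m = None
--     for x in reversed(sez):
--         if m is None or x <= m:
--             out.append(x)
--             m = x
--     out.reverse()
--     return out
-- ===== Notes on version B (the rewrite author's own statement) =====
-- stated objective: faster
-- what changed: Replaced the per-index min(sez[i:]) rescan with a single right-to-left pass that maintains the running suffix minimum and collects qualifying elements, reversing once at the end.
import Mathlib
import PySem

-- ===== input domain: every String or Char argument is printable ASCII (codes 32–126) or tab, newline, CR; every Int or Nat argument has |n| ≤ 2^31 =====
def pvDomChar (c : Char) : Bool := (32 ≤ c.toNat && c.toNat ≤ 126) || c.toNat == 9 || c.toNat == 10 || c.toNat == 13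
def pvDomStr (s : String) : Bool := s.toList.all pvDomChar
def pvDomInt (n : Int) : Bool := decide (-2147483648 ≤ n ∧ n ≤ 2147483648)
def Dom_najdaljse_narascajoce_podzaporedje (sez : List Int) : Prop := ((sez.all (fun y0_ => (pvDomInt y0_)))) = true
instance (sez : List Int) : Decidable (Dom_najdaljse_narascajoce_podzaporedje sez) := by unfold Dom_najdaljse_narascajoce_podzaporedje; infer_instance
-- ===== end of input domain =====

-- B replaces A's O(n^2) per-index rescan of min(sez[i:]) with one backward pass
-- keeping the running suffix minimum (objective: faster, asymptotic).

-- ===== PORT A =====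
-- for i in range(len(sez)): if sez[i] == min(sez[i:]): zaporedje.append(sez[i])
-- (the 'none' match arms are unreachable: i is always in range, so sez[i:] is nonempty)
def najdaljse_narascajoce_podzaporedje (sez : List Int) : List Int :=
  (PySem.List.pyRange 0 (sez.length : Int)).foldl
    (fun zaporedje i =>
      match PySem.List.pyGet? sez i,
            PySem.List.min? (PySem.List.slice sez (some i) none) (fun y => y) with
      | some x, some m => if x == m then zaporedje ++ [x] else zaporedje
      | _, _ => zaporedje)
    []

-- ===== PORT B =====
def najdaljse_narascajoce_podzaporedje_alt (sez : List Int) : List Int :=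
  let st := sez.reverse.foldl
    (fun (s : Option Int × List Int) x =>
      match s.1 with
      | none => (some x, s.2 ++ [x])
      | some m => if x ≤ m then (some x, s.2 ++ [x]) else s)
    (none, [])
  st.2.reverse

-- ===== PRECONDITION & SPEC =====
def Spec_najdaljse_narascajoce_podzaporedje (sez : List Int) (out : List Int) : Prop := out = najdaljse_narascajoce_podzaporedje_alt sez
instance (sez : List Int) (out : List Int) : Decidable (Spec_najdaljse_narascajoce_podzaporedje sez out) := by unfold Spec_najdaljse_narascajoce_podzaporedje; infer_instance

-- ===== CLAIM (what is proved, stated in full; the proofs are below) =====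
def Claim_equal_najdaljse_narascajoce_podzaporedje : Prop := ∀ (sez : List Int), Dom_najdaljse_narascajoce_podzaporedje sez → Spec_najdaljse_narascajoce_podzaporedje sez (najdaljse_narascajoce_podzaporedje sez)

-- ===== LEMMAS AND PROOFS =====

-- The common specification: keep x iff it is ≤ every element to its right.
def pvKeep : List Int → List Int
  | [] => []
  | x :: xs => (if x == List.foldl min x xs then [x] else []) ++ pvKeep xs

theorem pvA_nat (sez : List Int) :
    najdaljse_narascajoce_podzaporedje sez =
      (List.range sez.length).foldl
        (fun zaporedje k =>
          match sez[k]?, PySem.List.min? (sez.drop k) (fun y => y) with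
          | some x, some m => if x == m then zaporedje ++ [x] else zaporedje
          | _, _ => zaporedje)
        [] := by
  unfold najdaljse_narascajoce_podzaporedje
  rw [PySem.List.pyRange_zero_natCast, List.foldl_map]
  apply PySem.List.foldl_congr_mem
  intro acc k _
  rw [PySem.List.pyGet?_natCast, PySem.List.slice_from_natCast]

theorem pvA_eq_keep : ∀ (sez acc : List Int),
    (List.range sez.length).foldl
        (fun zaporedje k =>
          match sez[k]?, PySem.List.min? (sez.drop k) (fun y => y) with
          | some x, some m => if x == m then zaporedje ++ [x] else zaporedje
          | _, _ => zaporedje)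
        acc = acc ++ pvKeep sez := by
  intro sez
  induction sez with
  | nil => intro acc; simp [pvKeep]
  | cons x xs ih =>
    intro acc
    rw [List.length_cons, List.range_succ_eq_map, List.foldl_cons, List.foldl_map]
    refine Eq.trans (PySem.List.foldl_congr_mem _ _ (fun zaporedje k =>
        match xs[k]?, PySem.List.min? (xs.drop k) (fun y => y) with
        | some x, some m => if x == m then zaporedje ++ [x] else zaporedje
        | _, _ => zaporedje) _ ?_) ((ih _).trans ?_)
    · intro a k _
      simp only [Nat.succ_eq_add_one, List.getElem?_cons_succ, List.drop_succ_cons]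
    · simp only [List.getElem?_cons_zero, List.drop_zero, PySem.List.min?_id_cons, pvKeep]
      split <;> simp

-- First component of B's state after consuming xs.reverse is the minimum of xs.
def pvMino : List Int → Option Int
  | [] => none
  | x :: xs => some (List.foldl min x xs)

theorem pvB_loop : ∀ (xs : List Int),
    xs.reverse.foldl
      (fun (s : Option Int × List Int) x =>
        match s.1 with
        | none => (some x, s.2 ++ [x])
        | some m => if x ≤ m then (some x, s.2 ++ [x]) else s)
      (none, []) = (pvMino xs, (pvKeep xs).reverse) := by
  intro xs
  induction xs with
  | nil => simp [pvMino, pvKeep]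
  | cons x xs ih =>
    rw [List.reverse_cons, List.foldl_append, ih, List.foldl_cons, List.foldl_nil]
    cases xs with
    | nil => simp [pvMino, pvKeep]
    | cons y t =>
      simp only [pvMino, pvKeep]
      have hassoc : List.foldl min (min x y) t = min x (List.foldl min y t) :=
        (List.foldl_assoc (op := min) ..)
      by_cases h : x ≤ List.foldl min y t
      · have hmin : min x (List.foldl min y t) = x := min_eq_left h
        simp [h, hassoc, List.foldl_cons]
      · have hlt : List.foldl min y t < x := lt_of_not_ge h
        simp [h, hassoc, List.foldl_cons]
        omega

theorem pvB_eq_keep (sez : List Int) :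
    najdaljse_narascajoce_podzaporedje_alt sez = pvKeep sez := by
  unfold najdaljse_narascajoce_podzaporedje_alt
  rw [pvB_loop]
  simp

-- ===== VERDICT (by name: the statement is the Claim_ definition above) =====
theorem najdaljse_narascajoce_podzaporedje_spec : Claim_equal_najdaljse_narascajoce_podzaporedje := by
  intro sez _
  unfold Spec_najdaljse_narascajoce_podzaporedje
  rw [pvA_nat, pvA_eq_keep, pvB_eq_keep]
  simp
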